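-- pv_equiv track=rewrite | github.com/Dhruvin3103/sem6 | IS/playfaircipher.py | add_extra_character
-- ===== SOURCE A (Python) =====
-- def add_extra_character(word):
--     result = ""
--     # extra_char = find_missing_letters(word)
--     for i in range(len(word) - 1):
--         result += word[i]
--         if word[i] == word[i + 1]:
--             result += "X"
--     result += word[-1]
--
--     if len(result)%2!=0:
--         result += "X"
--     return result
-- ===== SOURCE B (Python) =====
-- def add_extra_character(word):
--     # Run-grouping rewrite: split word into maximal runs of equal chars,
--     # interleave "X" inside each run, then pad to even length.
--     parts = []
--     i = 0
--     n = len(word)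
--     while i < n:
--         j = i
--         while j < n and word[j] == word[i]:
--             j += 1
--         parts.append("X".join(word[i] * (j - i)))
--         i = j
--     out = "".join(parts)
--     if len(out) % 2 != 0:
--         out += "X"
--     return out
-- ===== Notes on version B (the rewrite author's own statement) =====
-- stated objective: alternative
-- what changed: Replaces A's flat pairwise-lookahead index scan with a run-grouping pass: the word is split into maximal runs of equal characters, the filler letter is interleaved inside each run, and the result is padded to even length.
-- outside the precondition, e.g. on add_extra_character(''): A raises IndexError, B returns ''
import Mathlib
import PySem

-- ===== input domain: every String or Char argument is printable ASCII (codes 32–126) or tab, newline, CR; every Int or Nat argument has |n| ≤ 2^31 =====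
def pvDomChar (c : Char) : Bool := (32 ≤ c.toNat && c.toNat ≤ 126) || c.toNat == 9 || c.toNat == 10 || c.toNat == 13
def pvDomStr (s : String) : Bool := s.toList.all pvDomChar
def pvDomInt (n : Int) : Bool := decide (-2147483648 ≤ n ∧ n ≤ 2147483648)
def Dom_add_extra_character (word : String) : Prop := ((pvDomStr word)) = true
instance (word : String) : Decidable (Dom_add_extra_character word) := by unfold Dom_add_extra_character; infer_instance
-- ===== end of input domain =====

-- B replaces A's flat pairwise-lookahead scan by a run-grouping pass (maximal runs of
-- equal characters, "X" interleaved inside each run); objective: alternative decomposition.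

-- ===== PORT A =====
-- literal port of A: for i in range(len(word)-1): result += word[i]; if word[i]==word[i+1]: result += "X";
-- then result += word[-1]; pad with "X" if odd length.  word[-1] on the empty string raises
-- IndexError in Python (pyGetD is only meaningful under Pre_, which excludes the empty string).
def add_extra_character (word : String) : String :=
  let w := word.toList
  let result : List Char :=
    (PySem.List.pyRange 0 (PySem.Str.len word - 1) 1).foldl
      (fun result i =>
        let result := result ++ [PySem.List.pyGetD w i ' ']
        if PySem.List.pyGetD w i ' ' = PySem.List.pyGetD w (i + 1) ' ' then result ++ ['X']
        else result)
      []
  let result := result ++ [PySem.List.pyGetD w (-1) ' ']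
  let result := if result.length % 2 ≠ 0 then result ++ ['X'] else result
  String.ofList result

-- ===== PORT B =====
-- "X".join(word[i] * (j - i)): a run of k+1 copies of c with "X" interleaved
def pvRunEmit (c : Char) (k : Nat) : List Char :=
  c :: (List.replicate k ['X', c]).flatten

-- outer while loop of B: peel one maximal run (inner while = takeWhile/dropWhile), emit it, recurse
def pvRuns : List Char → List Char
  | [] => []
  | c :: rest =>
      pvRunEmit c (rest.takeWhile (· == c)).length ++ pvRuns (rest.dropWhile (· == c))
termination_by l => l.length
decreasing_by
  simp only [List.length_cons]
  exact Nat.lt_succ_of_le (List.length_dropWhile_le _ _)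

def add_extra_character_alt (word : String) : String :=
  let out := pvRuns word.toList
  let out := if out.length % 2 ≠ 0 then out ++ ['X'] else out
  String.ofList out

-- ===== PRECONDITION & SPEC =====
-- Pre_ excludes only the empty string, on which A's word[-1] raises IndexError.
def Pre_add_extra_character (word : String) : Prop := word.toList ≠ []
instance (word : String) : Decidable (Pre_add_extra_character word) := by
  unfold Pre_add_extra_character; infer_instance

def pvWitness_add_extra_character : String := "hello"

def Spec_add_extra_character (word : String) (out : String) : Prop := out = add_extra_character_alt word
instance (word : String) (out : String) : Decidable (Spec_add_extra_character word out) := by unfold Spec_add_extra_character; infer_instance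

-- ===== CLAIM (what is proved, stated in full; the proofs are below) =====
def Claim_equal_add_extra_character : Prop := ∀ (word : String), Dom_add_extra_character word → Pre_add_extra_character word → Spec_add_extra_character word (add_extra_character word)

-- ===== LEMMAS AND PROOFS =====

-- A's per-position emission
def pvPair (a b : Char) : List Char := a :: (if a = b then ['X'] else [])

-- A's loop body as a flatMap over adjacent pairs (Nat-range form)
lemma pv_adj_flatMap (w : List Char) (d : Char) :
    (List.range (w.length - 1)).flatMap
      (fun i => pvPair (w.getD i d) (w.getD (i + 1) d)) =
    (w.zip w.tail).flatMap (fun p => pvPair p.1 p.2) := by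
  induction w with
  | nil => simp
  | cons a rest ih =>
    cases rest with
    | nil => simp
    | cons b t =>
      have hr : (a :: b :: t : List Char).length - 1 = ((b :: t : List Char).length - 1) + 1 := by
        simp
      rw [hr, List.range_succ_eq_map]
      simp only [List.flatMap_cons, List.flatMap_map]
      have : ((List.range ((b :: t : List Char).length - 1)).flatMap
          (fun i => pvPair ((a :: b :: t : List Char).getD (i + 1) d)
                          ((a :: b :: t : List Char).getD (i + 1 + 1) d))) =
          ((List.range ((b :: t : List Char).length - 1)).flatMap
          (fun i => pvPair ((b :: t : List Char).getD i d) ((b :: t : List Char).getD (i + 1) d))) := by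
        apply List.flatMap_congr
        intro i _
        simp
      rw [this, ih]
      simp [pvPair]

-- A's whole pre-pad result, as pairs-flatMap plus the last character
def pvCore (w : List Char) (h : w ≠ []) : List Char :=
  (w.zip w.tail).flatMap (fun p => pvPair p.1 p.2) ++ [w.getLast h]

-- peel one maximal run off pvCore
lemma pv_core_run (rest : List Char) (a : Char) :
    pvCore (a :: rest) (by simp) =
      pvRunEmit a (rest.takeWhile (· == a)).length ++
        (if h : rest.dropWhile (· == a) = [] then []
         else pvCore (rest.dropWhile (· == a)) h) := by
  induction rest generalizing a with
  | nil => simp [pvCore, pvRunEmit]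
  | cons b t ih =>
    by_cases hab : b = a
    · subst hab
      have h1 : pvCore (b :: b :: t) (by simp) = [b, 'X'] ++ pvCore (b :: t) (by simp) := by
        simp [pvCore, pvPair]
      rw [h1, ih b]
      simp [pvRunEmit, List.replicate_succ]
    · have hba : ¬ (b == a) = true := by simp [hab]
      have h1 : pvCore (a :: b :: t) (by simp) = [a] ++ pvCore (b :: t) (by simp) := by
        simp [pvCore, pvPair, Ne.symm hab]
      rw [h1]
      simp [pvRunEmit, hba]

-- main structural fact: A's pre-pad string equals B's run-grouping output
lemma pv_core_eq_runs : ∀ (w : List Char) (h : w ≠ []), pvCore w h = pvRuns w := by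
  intro w
  induction w using pvRuns.induct with
  | case1 => intro h; exact absurd rfl h
  | case2 a rest ih =>
    intro _
    rw [pv_core_run, pvRuns]
    by_cases hd : rest.dropWhile (· == a) = []
    · simp [hd, pvRuns]
    · rw [dif_neg hd, ih hd]

-- A's foldl loop computes the pairs-flatMap
lemma pv_loop_eq (word : String) (h : word.toList ≠ []) :
    (PySem.List.pyRange 0 (PySem.Str.len word - 1) 1).foldl
      (fun result i =>
        let result := result ++ [PySem.List.pyGetD word.toList i ' ']
        if PySem.List.pyGetD word.toList i ' ' = PySem.List.pyGetD word.toList (i + 1) ' '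
        then result ++ ['X'] else result)
      [] =
    (word.toList.zip word.toList.tail).flatMap (fun p => pvPair p.1 p.2) := by
  set w := word.toList with hw
  have hbody : (fun (result : List Char) (i : Int) =>
        let result := result ++ [PySem.List.pyGetD w i ' ']
        if PySem.List.pyGetD w i ' ' = PySem.List.pyGetD w (i + 1) ' '
        then result ++ ['X'] else result) =
      (fun (result : List Char) (i : Int) =>
        result ++ pvPair (PySem.List.pyGetD w i ' ') (PySem.List.pyGetD w (i + 1) ' ')) := by
    funext result i
    by_cases hc : PySem.List.pyGetD w i ' ' = PySem.List.pyGetD w (i + 1) ' ' <;>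
      simp [pvPair, hc]
  rw [hbody, PySem.List.foldl_append_eq_flatMap]
  have hlen : PySem.Str.len word = (w.length : Int) := by
    simp [PySem.Str.len_eq, hw]
  rw [hlen, PySem.List.pyRange_one]
  simp only [List.nil_append, List.flatMap_map]
  have hto : ((w.length : Int) - 1 - 0).toNat = w.length - 1 := by omega
  rw [hto, ← pv_adj_flatMap w ' ']
  apply List.flatMap_congr
  intro k _
  have h2 : (0 : Int) + (k : Int) + 1 = ((k + 1 : Nat) : Int) := by push_cast; ring
  have h1 : (0 : Int) + (k : Int) = ((k : Int)) := by ring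
  rw [h2, h1, PySem.List.pyGetD_natCast, PySem.List.pyGetD_natCast]

-- ===== VERDICT (by name: the statement is the Claim_ definition above) =====
theorem add_extra_character_spec : Claim_equal_add_extra_character := by
  intro word _ hpre
  unfold Spec_add_extra_character add_extra_character add_extra_character_alt
  simp only []
  rw [pv_loop_eq word hpre, PySem.List.pyGetD_neg_one word.toList ' ' hpre]
  rw [show (word.toList.zip word.toList.tail).flatMap (fun p => pvPair p.1 p.2) ++
        [word.toList.getLast hpre] = pvCore word.toList hpre from rfl]
  rw [pv_core_eq_runs word.toList hpre]
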